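-- pv_equiv track=rewrite | github.com/cltl/micro-portraits | microportraits/microportraits.py | duplicate_heads
-- ===== SOURCE A (Python) =====
-- def duplicate_heads(heads):
--     '''
--     Function that checks whether all heads of a dependent are of the same type
--     :param heads:
--     :return: Boolean
--     '''
--     if len(heads) == 0:
--         return False
--     refence_rel = heads[0][1]
--     for headrel in heads:
--         if headrel[1] != refence_rel:
--             return False
--     return True
-- ===== SOURCE B (Python) =====
-- def duplicate_heads(heads):
--     '''
--     Function that checks whether all heads of a dependent are of the same type
--     :param heads:
--     :return: Boolean
--     '''
--     distinct = {h[1] for h in heads}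
--     return len(distinct) == 1
-- ===== Notes on version B (the rewrite author's own statement) =====
-- stated objective: simpler
-- what changed: Replaces the reference-element scan with early exit by building the set of distinct relation types and deciding by its cardinality (len == 1).
import Mathlib
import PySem

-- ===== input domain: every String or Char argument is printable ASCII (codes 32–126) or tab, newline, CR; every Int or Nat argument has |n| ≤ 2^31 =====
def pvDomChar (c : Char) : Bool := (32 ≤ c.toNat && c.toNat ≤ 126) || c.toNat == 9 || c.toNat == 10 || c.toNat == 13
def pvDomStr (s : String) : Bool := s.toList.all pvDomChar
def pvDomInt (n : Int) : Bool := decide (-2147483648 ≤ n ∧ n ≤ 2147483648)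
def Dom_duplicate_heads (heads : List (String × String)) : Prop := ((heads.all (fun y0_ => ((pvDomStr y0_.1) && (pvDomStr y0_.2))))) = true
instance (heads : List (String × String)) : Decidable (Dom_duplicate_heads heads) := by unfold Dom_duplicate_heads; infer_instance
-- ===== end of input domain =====

-- B replaces A's reference-element scan with early exit by a set of distinct relation types,
-- deciding by cardinality (simpler decomposition; same asymptotic cost).

-- ===== PORT A =====
-- the 'for headrel in heads' loop with its early 'return False'
def dupHeadsLoop (ref : String) : List (String × String) → Bool
  | [] => true
  | headrel :: rest => if headrel.2 ≠ ref then false else dupHeadsLoop ref rest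

def duplicate_heads (heads : List (String × String)) : Bool :=
  match heads with
  | [] => false
  | h :: _ => dupHeadsLoop h.2 heads

-- ===== PORT B =====
def duplicate_heads_alt (heads : List (String × String)) : Bool :=
  let distinct : PySem.Set String := PySem.Set.ofList (heads.map (fun h => h.2))
  PySem.Set.len distinct == 1

-- ===== PRECONDITION & SPEC =====
def Spec_duplicate_heads (heads : List (String × String)) (out : Bool) : Prop := out = duplicate_heads_alt heads
instance (heads : List (String × String)) (out : Bool) : Decidable (Spec_duplicate_heads heads out) := by unfold Spec_duplicate_heads; infer_instance

-- ===== CLAIM (what is proved, stated in full; the proofs are below) =====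
def Claim_equal_duplicate_heads : Prop := ∀ (heads : List (String × String)), Dom_duplicate_heads heads → Spec_duplicate_heads heads (duplicate_heads heads)

-- ===== LEMMAS AND PROOFS =====

theorem dupHeadsLoop_eq_all (ref : String) (l : List (String × String)) :
    dupHeadsLoop ref l = true ↔ ∀ x ∈ l, x.2 = ref := by
  induction l with
  | nil => simp [dupHeadsLoop]
  | cons a t ih =>
      simp only [dupHeadsLoop]
      by_cases h : a.2 = ref
      · simp [h, ih]
      · simp [h]

theorem le_length_foldl_add (t : List String) (s : PySem.Set String) :
    s.length ≤ (t.foldl PySem.Set.add s).length := by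
  induction t generalizing s with
  | nil => simp
  | cons a t ih =>
      refine le_trans ?_ (ih (PySem.Set.add s a))
      unfold PySem.Set.add
      split
      · exact le_refl _
      · simp

theorem len_foldl_add_singleton (t : List String) (h : String) :
    (t.foldl PySem.Set.add [h]).length = 1 ↔ ∀ x ∈ t, x = h := by
  induction t with
  | nil => simp
  | cons a t ih =>
      by_cases hx : a = h
      · have hstep : PySem.Set.add [h] a = [h] := by
          unfold PySem.Set.add
          rw [if_pos (by simp [hx])]
        simp only [List.foldl, hstep]
        rw [ih]
        simp [List.forall_mem_cons, hx]
      · have h2 : (2 : Nat) ≤ (t.foldl PySem.Set.add [h, a]).length := by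
          simpa using le_length_foldl_add t [h, a]
        have : PySem.Set.add [h] a = [h, a] := by
          unfold PySem.Set.add
          rw [if_neg (by simp [hx])]
          rfl
        simp only [List.foldl, this]
        constructor
        · intro hlen; omega
        · intro hall; exact absurd (hall a (by simp)) hx

theorem duplicate_heads_eq (heads : List (String × String)) :
    duplicate_heads heads = duplicate_heads_alt heads := by
  cases heads with
  | nil => rfl
  | cons h t =>
      have hA : duplicate_heads (h :: t) = true ↔ ∀ x ∈ t, x.2 = h.2 := by
        simp only [duplicate_heads, dupHeadsLoop, if_neg (by simp : ¬ h.2 ≠ h.2)]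
        rw [dupHeadsLoop_eq_all]
      have hB : duplicate_heads_alt (h :: t) = true ↔ ∀ x ∈ t, x.2 = h.2 := by
        simp only [duplicate_heads_alt, PySem.Set.ofList_eq_foldl, PySem.Set.len,
          List.map_cons, List.foldl_cons, beq_iff_eq]
        have hadd : PySem.Set.add ([] : PySem.Set String) h.2 = [h.2] := by
          unfold PySem.Set.add
          rw [if_neg (by simp)]
          rfl
        rw [hadd]
        rw [show ((List.length (List.foldl PySem.Set.add [h.2] (t.map (fun h => h.2))) : Int) = 1
              ↔ List.length (List.foldl PySem.Set.add [h.2] (t.map (fun h => h.2))) = 1) by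
          exact_mod_cast Iff.rfl]
        rw [len_foldl_add_singleton]
        constructor
        · intro H x hx
          exact H x.2 (List.mem_map.mpr ⟨x, hx, rfl⟩)
        · intro H y hy
          obtain ⟨x, hx, rfl⟩ := List.mem_map.mp hy
          exact H x hx
      by_cases hv : duplicate_heads (h :: t) = true
      · rw [hv, Eq.symm (hB.mpr (hA.mp hv))]
      · have : duplicate_heads_alt (h :: t) ≠ true := fun c => hv (hA.mpr (hB.mp c))
        simp [Bool.not_eq_true] at hv this
        rw [hv, this]

-- ===== VERDICT (by name: the statement is the Claim_ definition above) =====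
theorem duplicate_heads_spec : Claim_equal_duplicate_heads := by
  intro heads _
  exact duplicate_heads_eq heads
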